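-- pv_equiv track=rewrite | github.com/5tukgpt/poker-bot | poker/ai/strategy/cfr.py | history_string
-- ===== SOURCE A (Python) =====
-- def history_string(actions: list[int], street_breaks: list[int]) -> str:
--     """Encode action history. street_breaks marks where new streets start."""
--     parts = []
--     breaks_set = set(street_breaks)
--     for i, a in enumerate(actions):
--         if i in breaks_set:
--             parts.append('|')
--         parts.append(str(a))
--     return ''.join(parts)
-- ===== SOURCE B (Python) =====
-- def history_string(actions: list[int], street_breaks: list[int]) -> str:
--     """Encode action history by slicing at the street-break cut points and joining with '|'."""
--     n = len(actions)
--     positions = sorted(b for b in set(street_breaks) if 0 <= b < n)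
--     segments = []
--     start = 0
--     for p in positions:
--         segments.append(actions[start:p])
--         start = p
--     segments.append(actions[start:])
--     return '|'.join(''.join(str(a) for a in seg) for seg in segments)
-- ===== Notes on version B (the rewrite author's own statement) =====
-- stated objective: alternative
-- what changed: Replaces the per-element set-membership loop by computing the sorted in-range cut points once, slicing the action list into contiguous segments at those points, rendering each segment and joining with '|'.
import Mathlib
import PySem

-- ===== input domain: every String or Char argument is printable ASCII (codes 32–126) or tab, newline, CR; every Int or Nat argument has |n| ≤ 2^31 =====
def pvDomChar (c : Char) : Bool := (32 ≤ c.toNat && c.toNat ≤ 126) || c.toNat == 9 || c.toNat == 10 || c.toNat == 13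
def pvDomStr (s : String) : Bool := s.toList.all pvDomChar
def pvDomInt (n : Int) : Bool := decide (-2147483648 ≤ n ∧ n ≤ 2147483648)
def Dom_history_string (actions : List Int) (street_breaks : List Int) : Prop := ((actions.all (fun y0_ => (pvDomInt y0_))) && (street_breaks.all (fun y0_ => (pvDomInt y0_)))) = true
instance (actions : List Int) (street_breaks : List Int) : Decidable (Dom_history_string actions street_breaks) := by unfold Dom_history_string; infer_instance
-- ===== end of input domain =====

-- B replaces A's per-element set-membership loop by slicing the action list at the
-- sorted in-range cut points and joining the rendered segments with '|' (alternative decomposition, same cost).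

-- ===== PORT A =====
def history_string (actions : List Int) (street_breaks : List Int) : String :=
  let breaks_set := PySem.Set.ofList street_breaks
  let parts : List String :=
    (PySem.List.enumerate actions).foldl
      (fun parts ia =>
        (if ia.1 ∈ breaks_set then parts ++ ["|"] else parts) ++ [PySem.Int.toStr ia.2])
      []
  PySem.Str.join "" parts

-- ===== PORT B =====
def history_string_alt (actions : List Int) (street_breaks : List Int) : String :=
  let n : Int := actions.length
  let positions : List Int :=
    PySem.List.sorted
      ((PySem.Set.ofList street_breaks).filter (fun b => decide (0 ≤ b ∧ b < n)))
      (fun x => x) false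
  let st : List (List Int) × Int :=
    positions.foldl
      (fun st p => (st.1 ++ [PySem.List.slice actions (some st.2) (some p)], p))
      ([], 0)
  let segments := st.1 ++ [PySem.List.slice actions (some st.2) none]
  PySem.Str.join "|"
    (segments.map (fun seg => PySem.Str.join "" (seg.map (fun a => PySem.Int.toStr a))))

-- ===== PRECONDITION & SPEC =====
def Spec_history_string (actions : List Int) (street_breaks : List Int) (out : String) : Prop := out = history_string_alt actions street_breaks
instance (actions : List Int) (street_breaks : List Int) (out : String) : Decidable (Spec_history_string actions street_breaks out) := by unfold Spec_history_string; infer_instance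

-- ===== CLAIM (what is proved, stated in full; the proofs are below) =====
def Claim_equal_history_string : Prop := ∀ (actions : List Int) (street_breaks : List Int), Dom_history_string actions street_breaks → Spec_history_string actions street_breaks (history_string actions street_breaks)

-- ===== LEMMAS AND PROOFS =====

/-- Per-index encoding: marker bar iff the index is in `M`, then the digits. -/
def pvEnc (M : List Int) : List (Int × Int) → List Char
  | [] => []
  | (i, a) :: r => (if i ∈ M then ['|'] else []) ++ PySem.Int.toChars a ++ pvEnc M r

/-- The segment list B's loop builds: cut `actions` at the points `ps`, from `start`. -/
def pvWalk (actions : List Int) : List Int → Int → List (List Int)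
  | [], start => [PySem.List.slice actions (some start) none]
  | p :: ps, start => PySem.List.slice actions (some start) (some p) :: pvWalk actions ps p

def pvRender (seg : List Int) : List Char := (seg.map PySem.Int.toChars).flatten

theorem pvJoinNil (css : List (List Char)) : PySem.Chars.join [] css = css.flatten := by
  induction css with
  | nil => simp [PySem.Chars.join, List.intercalate]
  | cons x rest ih =>
    cases rest with
    | nil => simp [PySem.Chars.join_singleton]
    | cons y r => simp [PySem.Chars.join_cons_cons, ih]

theorem pvEnc_append (M : List Int) (x y : List (Int × Int)) :
    pvEnc M (x ++ y) = pvEnc M x ++ pvEnc M y := by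
  induction x with
  | nil => simp [pvEnc]
  | cons p r ih => cases p; simp [pvEnc, ih]

theorem pvEnc_congr (M M' : List Int) (l : List (Int × Int))
    (h : ∀ pr ∈ l, (pr.1 ∈ M ↔ pr.1 ∈ M')) : pvEnc M l = pvEnc M' l := by
  induction l with
  | nil => rfl
  | cons p r ih =>
    cases p with
    | mk i a =>
      have h1 := h (i, a) (List.mem_cons_self ..)
      simp only [pvEnc]
      rw [ih (fun pr hpr => h pr (List.mem_cons_of_mem _ hpr))]
      by_cases hm : i ∈ M
      · rw [if_pos hm, if_pos (h1.mp hm)]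
      · rw [if_neg hm, if_neg (fun hc => hm (h1.mpr hc))]

theorem pvEnc_no_marker (M : List Int) (l : List (Int × Int))
    (h : ∀ pr ∈ l, pr.1 ∉ M) :
    pvEnc M l = (l.map (fun pr => PySem.Int.toChars pr.2)).flatten := by
  induction l with
  | nil => rfl
  | cons p r ih =>
    cases p with
    | mk i a =>
      simp only [pvEnc, List.map_cons, List.flatten_cons]
      rw [if_neg (h (i, a) (List.mem_cons_self ..)), ih (fun pr hpr => h pr (List.mem_cons_of_mem _ hpr))]
      simp

theorem pvFoldA (M : List Int) (l : List (Int × Int)) (acc : List String) :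
    ((l.foldl
        (fun parts ia =>
          (if ia.1 ∈ M then parts ++ ["|"] else parts) ++ [PySem.Int.toStr ia.2])
        acc).map String.toList).flatten
      = (acc.map String.toList).flatten ++ pvEnc M l := by
  induction l generalizing acc with
  | nil => simp [pvEnc]
  | cons p r ih =>
    cases p with
    | mk i a =>
      simp only [List.foldl_cons, pvEnc]
      rw [ih]
      by_cases hm : i ∈ M
      · simp [hm, PySem.Int.toList_toStr]
      · simp [hm, PySem.Int.toList_toStr]

theorem pvFoldWalk (actions : List Int) (ps : List Int) (segs : List (List Int)) (start : Int) :
    (ps.foldl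
        (fun st p => (st.1 ++ [PySem.List.slice actions (some st.2) (some p)], p))
        (segs, start)).1
      ++ [PySem.List.slice actions
            (some (ps.foldl
              (fun st p => (st.1 ++ [PySem.List.slice actions (some st.2) (some p)], p))
              (segs, start)).2) none]
      = segs ++ pvWalk actions ps start := by
  induction ps generalizing segs start with
  | nil => simp [pvWalk]
  | cons p r ih => simp [pvWalk, ih]

theorem pvWalk_ne_nil (actions : List Int) (ps : List Int) (start : Int) :
    pvWalk actions ps start ≠ [] := by
  cases ps <;> simp [pvWalk]

theorem pvMainWalk (actions : List Int) (ps : List Int) (start : Int)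
    (h0 : 0 ≤ start) (hn : start ≤ (actions.length : Int))
    (hb : ∀ p ∈ ps, start ≤ p ∧ p < (actions.length : Int))
    (hp : ps.Pairwise (· < ·)) :
    PySem.Chars.join ['|'] ((pvWalk actions ps start).map pvRender)
      = pvEnc ps (PySem.List.enumerate (actions.drop start.toNat) start) := by
  induction ps generalizing start with
  | nil =>
    rw [pvWalk]
    simp only [List.map_cons, List.map_nil, PySem.Chars.join_singleton]
    rw [PySem.List.slice_from _ h0, pvEnc_no_marker _ _ (by simp), pvRender]
    have hmap : (PySem.List.enumerate (actions.drop start.toNat) start).map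
        (fun pr => PySem.Int.toChars pr.2)
        = (actions.drop start.toNat).map PySem.Int.toChars := by
      rw [show (fun pr : Int × Int => PySem.Int.toChars pr.2)
            = PySem.Int.toChars ∘ (fun pr : Int × Int => pr.2) from rfl,
          ← List.map_map, PySem.List.map_snd_enumerate]
    rw [hmap]
  | cons p ps' ih =>
    obtain ⟨hsp, hpn⟩ := hb p (List.mem_cons_self ..)
    have hppos : (0 : Int) ≤ p := le_trans h0 hsp
    have hforall : ∀ q ∈ ps', p < q := fun q hq => List.rel_of_pairwise_cons hp hq
    have hb' : ∀ q ∈ ps', p ≤ q ∧ q < (actions.length : Int) :=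
      fun q hq => ⟨le_of_lt (hforall q hq), (hb q (List.mem_cons_of_mem _ hq)).2⟩
    have ihp := ih p hppos (le_of_lt hpn) hb' (List.pairwise_cons.mp hp).2
    have hpNlt : p.toNat < actions.length := by omega
    have hd : actions.drop p.toNat = actions[p.toNat] :: actions.drop (p.toNat + 1) :=
      List.drop_eq_getElem_cons hpNlt
    have hEtail : PySem.List.enumerate (actions.drop p.toNat) p
        = (p, actions[p.toNat]) :: PySem.List.enumerate (actions.drop (p.toNat + 1)) (p + 1) := by
      rw [hd, PySem.List.enumerate_cons]
    have hcongr : pvEnc (p :: ps') (PySem.List.enumerate (actions.drop (p.toNat + 1)) (p + 1))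
        = pvEnc ps' (PySem.List.enumerate (actions.drop (p.toNat + 1)) (p + 1)) := by
      apply pvEnc_congr
      intro pr hpr
      rw [PySem.List.mem_enumerate_iff] at hpr
      obtain ⟨k, hk, rfl⟩ := hpr
      simp only [List.mem_cons]
      constructor
      · rintro (h | h)
        · exfalso; omega
        · exact h
      · exact fun h => Or.inr h
    have hpnotin : p ∉ ps' := fun h => lt_irrefl p (hforall p h)
    have hmidlen : ((actions.drop start.toNat).take (p.toNat - start.toNat)).length
        = p.toNat - start.toNat := by
      simp only [List.length_take, List.length_drop]
      omega
    have hsplit : actions.drop start.toNat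
        = (actions.drop start.toNat).take (p.toNat - start.toNat) ++ actions.drop p.toNat := by
      have h1 : (actions.drop start.toNat).drop (p.toNat - start.toNat)
          = actions.drop p.toNat := by
        rw [List.drop_drop]
        congr 1
        omega
      conv_lhs => rw [← List.take_append_drop (p.toNat - start.toNat) (actions.drop start.toNat)]
      rw [h1]
    have hmid : pvEnc (p :: ps')
        (PySem.List.enumerate ((actions.drop start.toNat).take (p.toNat - start.toNat)) start)
        = pvRender (PySem.List.slice actions (some start) (some p)) := by
      rw [pvEnc_no_marker, pvRender]
      · rw [show (fun pr : Int × Int => PySem.Int.toChars pr.2)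
              = PySem.Int.toChars ∘ (fun pr : Int × Int => pr.2) from rfl,
            ← List.map_map, PySem.List.map_snd_enumerate,
            PySem.List.slice_toNat actions h0 hppos]
      · intro pr hpr
        rw [PySem.List.mem_enumerate_iff] at hpr
        obtain ⟨k, hk, rfl⟩ := hpr
        rw [hmidlen] at hk
        intro hmem
        rcases List.mem_cons.mp hmem with h | h
        · omega
        · have := hforall _ h; omega
    rw [pvWalk]
    cases hW : pvWalk actions ps' p with
    | nil => exact absurd hW (pvWalk_ne_nil actions ps' p)
    | cons w ws =>
      simp only [List.map_cons, PySem.Chars.join_cons_cons]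
      rw [← List.map_cons, ← hW, ihp, hEtail]
      simp only [pvEnc, if_neg hpnotin, List.nil_append]
      conv_rhs => rw [hsplit, PySem.List.enumerate_append, pvEnc_append]
      rw [hmidlen]
      have harg : start + ((p.toNat - start.toNat : Nat) : Int) = p := by omega
      rw [harg, hmid, hEtail]
      simp only [pvEnc, if_pos (List.mem_cons_self ..), hcongr]
      simp [List.append_assoc]

theorem history_string_spec : Claim_equal_history_string := by
  intro actions street_breaks _
  unfold Spec_history_string
  apply String.toList_inj.mp
  have hA : (history_string actions street_breaks).toList
      = pvEnc (PySem.Set.ofList street_breaks) (PySem.List.enumerate actions 0) := by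
    simp only [history_string]
    rw [PySem.Str.toList_join, show ("" : String).toList = [] from rfl, pvJoinNil, pvFoldA]
    simp
  have hrender : ∀ seg : List Int,
      (PySem.Str.join "" (seg.map (fun a => PySem.Int.toStr a))).toList = pvRender seg := by
    intro seg
    rw [PySem.Str.toList_join, show ("" : String).toList = [] from rfl, pvJoinNil, pvRender]
    simp [List.map_map, Function.comp_def, PySem.Int.toList_toStr]
  have hB : (history_string_alt actions street_breaks).toList
      = PySem.Chars.join ['|']
          ((pvWalk actions
              (PySem.List.sorted
                ((PySem.Set.ofList street_breaks).filter
                  (fun b => decide (0 ≤ b ∧ b < (actions.length : Int))))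
                (fun x => x) false)
              0).map pvRender) := by
    simp only [history_string_alt]
    rw [PySem.Str.toList_join, show ("|" : String).toList = ['|'] from rfl, pvFoldWalk]
    rw [List.nil_append, List.map_map]
    congr 1
    apply List.map_congr_left
    intro seg _
    exact hrender seg
  set positions : List Int :=
    PySem.List.sorted
      ((PySem.Set.ofList street_breaks).filter
        (fun b => decide (0 ≤ b ∧ b < (actions.length : Int))))
      (fun x => x) false with hposdef
  have hmemP : ∀ x : Int, x ∈ positions ↔
      (x ∈ street_breaks ∧ 0 ≤ x ∧ x < (actions.length : Int)) := by
    intro x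
    rw [hposdef, PySem.List.mem_sorted, List.mem_filter, PySem.Set.mem_ofList]
    simp
  have hnodupP : positions.Nodup :=
    ((PySem.List.sorted_perm _ _ _).nodup_iff).mpr
      ((PySem.Set.nodup_ofList street_breaks).filter _)
  have hpwP : positions.Pairwise (· < ·) := by
    have h1 := PySem.List.sorted_pairwise
      ((PySem.Set.ofList street_breaks).filter
        (fun b => decide (0 ≤ b ∧ b < (actions.length : Int))))
      (fun x => x)
    exact (h1.and hnodupP).imp (fun h => lt_of_le_of_ne h.1 h.2)
  have hbs : ∀ p ∈ positions, (0 : Int) ≤ p ∧ p < (actions.length : Int) :=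
    fun p hp => ((hmemP p).mp hp).2
  rw [hA, hB,
      pvMainWalk actions positions 0 le_rfl (by exact_mod_cast Nat.zero_le _) hbs hpwP]
  simp only [Int.toNat_zero, List.drop_zero]
  apply pvEnc_congr
  intro pr hpr
  rw [PySem.List.mem_enumerate_iff] at hpr
  obtain ⟨k, hk, rfl⟩ := hpr
  rw [PySem.Set.mem_ofList, hmemP]
  constructor
  · intro h; exact ⟨h, by omega, by omega⟩
  · exact fun h => h.1
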